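-- pv_equiv track=rewrite | github.com/schneiderb-projects/TwoNotTouchWithSat | TwoNotTouchEquation.py | build_truth_table_inputs
-- ===== SOURCE A (Python) =====
-- def arrange_literal(literal, position, max_position):
--     multiplier = -1  # start with a negated literal
--     counter = 0  # counts the number of literals added to the list
--     to_return = []  # stores the
--     while counter < 2 ** max_position:
--         for y in range(2 ** position):
--             to_return.append(literal * multiplier)
--             counter += 1
--         multiplier *= -1
--
--     return to_return
--
-- def build_truth_table_inputs(literals):
--     to_return = []
--     temp = []
--
--     # creates the truth table
--     for position, literal in enumerate(literals):
--         temp.append(arrange_literal(literal, position, len(literals)))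
--
--     # apply transform to the list
--     for x in range(len(temp[0])):
--         to_add = []
--         for y in reversed(temp):
--             to_add.append(y[x])
--         to_return.append(to_add)
--     return to_return  # returns truth table where each sub-list contains on of every literal either positive or negated
-- ===== SOURCE B (Python) =====
-- def build_truth_table_inputs(literals):
--     n = len(literals)
--     return [[literals[p] if (x // 2 ** p) % 2 == 1 else -literals[p]
--              for p in range(n - 1, -1, -1)]
--             for x in range(2 ** n)]
-- ===== Notes on version B (the rewrite author's own statement) =====
-- stated objective: alternative
-- what changed: B computes each truth-table row directly from the bits of its row index (sign of literal p = bit p of the row number), instead of building one full 2^n-long sign column per literal and then transposing; the per-literal column lists and the transpose pass disappear.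
-- crash fix: On empty literals A raises IndexError while indexing the first column; B returns a table with a single empty row. — e.g. on build_truth_table_inputs([]): A raises IndexError, B returns [[]]
import Mathlib
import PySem

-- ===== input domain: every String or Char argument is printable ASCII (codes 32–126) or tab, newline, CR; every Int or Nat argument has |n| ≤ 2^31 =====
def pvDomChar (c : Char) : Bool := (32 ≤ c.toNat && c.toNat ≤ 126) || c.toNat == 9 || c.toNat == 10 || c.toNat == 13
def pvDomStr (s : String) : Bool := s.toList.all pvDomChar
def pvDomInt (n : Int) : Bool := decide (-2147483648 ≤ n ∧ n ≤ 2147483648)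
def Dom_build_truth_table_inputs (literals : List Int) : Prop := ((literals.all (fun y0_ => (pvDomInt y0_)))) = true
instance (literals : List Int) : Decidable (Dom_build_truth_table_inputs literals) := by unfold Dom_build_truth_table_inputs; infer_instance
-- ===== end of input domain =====

-- B builds each row from the bits of the row index instead of A's per-literal columns + transpose (alternative decomposition, same cost).
-- ===== PORT A =====
-- while counter < bound: for y in range(2**pos): append(literal*mult); counter += 1; then mult *= -1
def arrangeLoop (literal : Int) (pos bound counter : Nat) (mult : Int) (acc : List Int) : List Int :=
  if counter < bound then
    arrangeLoop literal pos bound (counter + 2 ^ pos) (-mult)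
      ((List.range (2 ^ pos)).foldl (fun l _ => l ++ [literal * mult]) acc)
  else acc
termination_by bound - counter
decreasing_by have := Nat.one_le_two_pow (n := pos); omega

-- position comes from enumerate, so position ≥ 0 and position.toNat is exact for Python's 2**position
def arrange_literal (literal : Int) (position : Int) (max_position : Nat) : List Int :=
  arrangeLoop literal position.toNat (2 ^ max_position) 0 (-1) []

-- indexing the first column raises IndexError on empty literals (excluded by Pre_); y[x] is always in range under Pre_, so pyGetD _ _ 0 is exact
def build_truth_table_inputs (literals : List Int) : List (List Int) :=
  let temp := (PySem.List.enumerate literals 0).map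
    (fun pl => arrange_literal pl.2 pl.1 literals.length)
  (PySem.List.pyRange 0 ((temp.headD []).length : Int) 1).map (fun x =>
    temp.reverse.map (fun y => PySem.List.pyGetD y x 0))

-- ===== PORT B =====
-- [[literals[p] if (x // 2**p) % 2 == 1 else -literals[p] for p in range(n-1,-1,-1)] for x in range(2**n)]
-- p from range(n-1,-1,-1) is always a valid index, so pyGetD _ _ 0 is exact; p ≥ 0 so p.toNat is exact for 2**p
def build_truth_table_inputs_alt (literals : List Int) : List (List Int) :=
  let n := literals.length
  (PySem.List.pyRange 0 ((2 ^ n : Nat) : Int) 1).map (fun x =>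
    (PySem.List.pyRange ((n : Int) - 1) (-1) (-1)).map (fun p =>
      if PySem.Int.mod (PySem.Int.floordiv x ((2 : Int) ^ p.toNat)) 2 = 1 then
        PySem.List.pyGetD literals p 0
      else
        -(PySem.List.pyGetD literals p 0)))

-- ===== PRECONDITION & SPEC =====
-- A indexes the first column list, which raises IndexError exactly when literals is empty
def Pre_build_truth_table_inputs (literals : List Int) : Prop := literals ≠ []
instance (literals : List Int) : Decidable (Pre_build_truth_table_inputs literals) := by
  unfold Pre_build_truth_table_inputs; infer_instance
def pvWitness_build_truth_table_inputs : List Int := [1]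

-- On empty literals A raises IndexError while indexing the first column; B returns a table with a single empty row.
def Raises_build_truth_table_inputs (literals : List Int) : Prop := literals = []
instance (literals : List Int) : Decidable (Raises_build_truth_table_inputs literals) := by
  unfold Raises_build_truth_table_inputs; infer_instance
def pvRaiseWitness_build_truth_table_inputs : List Int := []
def pvRaiseWitnessOut_build_truth_table_inputs : List (List Int) := [[]]

def Spec_build_truth_table_inputs (literals : List Int) (out : List (List Int)) : Prop :=
  out = build_truth_table_inputs_alt literals
instance (literals : List Int) (out : List (List Int)) : Decidable (Spec_build_truth_table_inputs literals out) := by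
  unfold Spec_build_truth_table_inputs; infer_instance

-- ===== CLAIM (what is proved, stated in full; the proofs are below) =====
def Claim_equal_build_truth_table_inputs : Prop := ∀ (literals : List Int),
  Dom_build_truth_table_inputs literals → Pre_build_truth_table_inputs literals →
  Spec_build_truth_table_inputs literals (build_truth_table_inputs literals)
def Claim_raises_build_truth_table_inputs : Prop :=
  (∀ (literals : List Int), Dom_build_truth_table_inputs literals →
    Raises_build_truth_table_inputs literals → ¬ Pre_build_truth_table_inputs literals) ∧
  (Dom_build_truth_table_inputs pvRaiseWitness_build_truth_table_inputs ∧
    Raises_build_truth_table_inputs pvRaiseWitness_build_truth_table_inputs ∧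
    build_truth_table_inputs_alt pvRaiseWitness_build_truth_table_inputs =
      pvRaiseWitnessOut_build_truth_table_inputs)

-- ===== LEMMAS AND PROOFS =====

-- canonical description of one sign column: t blocks of width w, alternating sign starting with m
def pvBlocks (lit : Int) (w : Nat) : Nat → Int → List Int
  | 0, _ => []
  | t + 1, m => List.replicate w (lit * m) ++ pvBlocks lit w t (-m)

lemma pv_foldl_const (c : Int) : ∀ (n : Nat) (acc : List Int),
    (List.range n).foldl (fun l _ => l ++ [c]) acc = acc ++ List.replicate n c := by
  intro n
  induction n with
  | zero => simp
  | succ n ih =>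
    intro acc
    simp [List.range_succ, ih, List.replicate_succ']

lemma pv_arrangeLoop_eq (lit : Int) (pos : Nat) : ∀ (t c : Nat) (m : Int) (acc : List Int),
    arrangeLoop lit pos (c + t * 2 ^ pos) c m acc = acc ++ pvBlocks lit (2 ^ pos) t m := by
  intro t
  induction t with
  | zero => intro c m acc; rw [arrangeLoop]; simp [pvBlocks]
  | succ t ih =>
    intro c m acc
    have hw : 1 ≤ 2 ^ pos := Nat.one_le_two_pow
    rw [arrangeLoop]
    rw [if_pos (by nlinarith)]
    have : c + 2 ^ pos + t * 2 ^ pos = c + (t + 1) * 2 ^ pos := by ring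
    rw [pv_foldl_const, ← this, ih]
    simp [pvBlocks]

lemma pv_arrange_eq (lit : Int) (pos maxpos : Nat) (h : pos ≤ maxpos) :
    arrangeLoop lit pos (2 ^ maxpos) 0 (-1) [] = pvBlocks lit (2 ^ pos) (2 ^ (maxpos - pos)) (-1) := by
  have := pv_arrangeLoop_eq lit pos (2 ^ (maxpos - pos)) 0 (-1) []
  rwa [Nat.zero_add, Nat.pow_sub_mul_pow 2 h, List.nil_append] at this

lemma pv_length_blocks (lit : Int) (w : Nat) : ∀ (t : Nat) (m : Int),
    (pvBlocks lit w t m).length = t * w := by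
  intro t
  induction t with
  | zero => intro m; simp [pvBlocks]
  | succ t ih => intro m; simp [pvBlocks, ih]; ring

lemma pv_getD_blocks (lit : Int) (w : Nat) (hw : 0 < w) : ∀ (t x : Nat) (m : Int), x < t * w →
    (pvBlocks lit w t m).getD x 0 = if (x / w) % 2 = 1 then lit * (-m) else lit * m := by
  intro t
  induction t with
  | zero => intro x m hx; omega
  | succ t ih =>
    intro x m hx
    by_cases hxw : x < w
    · rw [Nat.div_eq_of_lt hxw]
      have hl : x < (List.replicate w (lit * m)).length := by simpa using hxw
      simp [pvBlocks, List.getD, List.getElem?_append_left hl, hxw]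
    · rw [Nat.not_lt] at hxw
      have h1 : (pvBlocks lit w (t + 1) m).getD x 0 = (pvBlocks lit w t (-m)).getD (x - w) 0 := by
        simp [pvBlocks, List.getD, List.getElem?_append_right (show (List.replicate w (lit * m)).length ≤ x by simpa using hxw)]
      have hx' : x - w < t * w := by
        have h2 : (t + 1) * w = t * w + w := by ring
        omega
      rw [h1, ih (x - w) (-m) hx']
      have hdiv : x / w = (x - w) / w + 1 := by
        rw [Nat.div_eq_sub_div hw hxw]
      rw [hdiv]
      by_cases hp : (x - w) / w % 2 = 1
      · rw [if_pos hp, if_neg (by omega)]; ring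
      · rw [if_neg hp, if_pos (by omega)]

-- one row of the table: A's transposed column reads equal B's bit-of-the-index reads
lemma pv_row (L : List Int) (k : Nat) (hk : k < 2 ^ L.length) :
    (((PySem.List.enumerate L 0).map (fun pl => arrange_literal pl.2 pl.1 L.length)).reverse).map
        (fun y => PySem.List.pyGetD y (0 + (k : Int)) 0) =
    (PySem.List.pyRange ((L.length : Int) - 1) (-1) (-1)).map (fun p =>
      if PySem.Int.mod (PySem.Int.floordiv (0 + (k : Int)) ((2 : Int) ^ p.toNat)) 2 = 1 then
        PySem.List.pyGetD L p 0 else -(PySem.List.pyGetD L p 0)) := by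
  rw [PySem.List.pyRange_neg_one]
  have hcnt : (((L.length : Int) - 1) - (-1)).toNat = L.length := by omega
  rw [hcnt]
  apply List.ext_getElem
  · simp [PySem.List.length_enumerate]
  intro j h1 h2
  have hj : j < L.length := by simpa using h2
  simp only [List.getElem_map, List.getElem_reverse, List.getElem_range, List.length_map,
    PySem.List.length_enumerate, PySem.List.getElem_enumerate]
  set n := L.length with hn
  set q := n - 1 - j with hq
  have hqlt : q < n := by omega
  have hcast : ((n : Int) - 1 - (j : Int)) = (q : Int) := by push_cast; omega
  rw [hcast]
  simp only [zero_add]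
  have hLHS : arrange_literal L[q] (q : Int) n = pvBlocks L[q] (2 ^ q) (2 ^ (n - q)) (-1) := by
    unfold arrange_literal
    rw [Int.toNat_natCast]
    exact pv_arrange_eq _ q n (le_of_lt hqlt)
  rw [hLHS, PySem.List.pyGetD_natCast]
  have hkb : k < 2 ^ (n - q) * 2 ^ q := by
    rw [Nat.pow_sub_mul_pow 2 (le_of_lt hqlt)]; exact hk
  rw [pv_getD_blocks L[q] (2 ^ q) (Nat.two_pow_pos q) (2 ^ (n - q)) k (-1) hkb]
  rw [Int.toNat_natCast]
  have hpow : ((2 : Int) ^ q) = ((2 ^ q : Nat) : Int) := by push_cast; ring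
  rw [hpow, PySem.Int.floordiv_natCast]
  have h2 : (2 : Int) = ((2 : Nat) : Int) := by norm_cast
  rw [h2, PySem.Int.mod_natCast, PySem.List.pyGetD_natCast,
      List.getD_eq_getElem L 0 (by omega)]
  by_cases hp : k / 2 ^ q % 2 = 1
  · simp [hp]
  · simp only [if_neg hp]
    have hp' : ((k / 2 ^ q % 2 : Nat) : Int) ≠ 1 := by exact_mod_cast hp
    rw [if_neg hp']
    ring

-- ===== VERDICT (by name: the statement is the Claim_ definition above) =====
theorem build_truth_table_inputs_spec : Claim_equal_build_truth_table_inputs := by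
  intro literals _ hpre
  unfold Spec_build_truth_table_inputs
  match literals, hpre with
  | a :: as, _ =>
    simp only [build_truth_table_inputs, build_truth_table_inputs_alt]
    have hhead : ((((PySem.List.enumerate (a :: as) 0).map
        (fun pl => arrange_literal pl.2 pl.1 (a :: as).length)).headD []).length)
        = 2 ^ (a :: as).length := by
      simp only [PySem.List.enumerate_cons, List.map_cons, List.headD_cons]
      rw [show arrange_literal a 0 (a :: as).length
            = arrangeLoop a 0 (2 ^ (a :: as).length) 0 (-1) [] from rfl,
          pv_arrange_eq a 0 (a :: as).length (Nat.zero_le _), pv_length_blocks]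
      simp
    rw [hhead]
    rw [PySem.List.pyRange_one]
    simp only [Int.sub_zero, Int.toNat_natCast, List.map_map]
    refine List.map_congr_left (fun k hk => ?_)
    have hk' : k < 2 ^ (a :: as).length := List.mem_range.mp hk
    exact pv_row (a :: as) k hk'

@[simp] theorem build_truth_table_inputs_raises : Claim_raises_build_truth_table_inputs := by
  unfold Claim_raises_build_truth_table_inputs
  exact ⟨fun l _ h => by simp [Raises_build_truth_table_inputs] at h; simp [Pre_build_truth_table_inputs, h], by decide⟩
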